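-- pv_equiv track=rewrite | github.com/HarryYN/2516_EM_distilroberta | utils.py | _find_pos_lang_code
-- ===== SOURCE A (Python) =====
-- def _find_pos_lang_code(dic, lang, rev_dic=None):
--     '''Backward rough matching by deleting one char in the end at a time
--     to find a str, either in the lang code or name, that matches.'''
--     if not rev_dic:
--         rev_dic = {v.lower(): k for k, v in dic.items()}
--
--     lang_lower = lang.lower()
--     if len(lang) == 1:
--         return {c: l for l, c in rev_dic.items() if l[0] == lang_lower}
--
--     for i in range(len(lang)-1, 0, -1):
--         pos_code = [c for c in dic.keys() if lang[:i] in c]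
--         if pos_code:
--             return {c: dic[c] for c in pos_code}
--         pos_lang = [l for l in rev_dic.keys() if lang_lower[:i] in l]
--         if pos_lang:
--             return {rev_dic[l]: l for l in pos_lang}
--     return
-- ===== SOURCE B (Python) =====
-- def _find_pos_lang_code(dic, lang, rev_dic=None):
--     """Same result as A, but the matching prefix length is found by binary
--     search on i (substring containment of lang[:i] is monotone in i)."""
--     if not rev_dic:
--         rev_dic = {v.lower(): k for k, v in dic.items()}
--
--     lang_lower = lang.lower()
--     if len(lang) == 1:
--         return {c: l for l, c in rev_dic.items() if l.startswith(lang_lower)}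
--
--     def max_match(keys, s):
--         # largest i in [0, len(lang)-1] such that s[:i] is contained in some key
--         if not keys:
--             return 0
--         lo, hi = 0, len(lang) - 1
--         while lo < hi:
--             mid = (lo + hi + 1) // 2
--             if any(s[:mid] in k for k in keys):
--                 lo = mid
--             else:
--                 hi = mid - 1
--         return lo
--
--     ic = max_match(list(dic.keys()), lang)
--     il = max_match(list(rev_dic.keys()), lang_lower)
--     if ic >= il and ic >= 1:
--         return {c: dic[c] for c in dic.keys() if lang[:ic] in c}
--     if il >= 1:
--         return {rev_dic[l]: l for l in rev_dic.keys() if lang_lower[:il] in l}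
--     return None
-- ===== Notes on version B (the rewrite author's own statement) =====
-- stated objective: faster
-- what changed: A scans prefix lengths i = len(lang)-1 ... 1 linearly, testing every key at each i; B binary-searches the largest matching prefix length (substring containment of lang[:i] is antitone in i) separately for the code keys and the name keys and builds the result dict only once at the found length.
import Mathlib
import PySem

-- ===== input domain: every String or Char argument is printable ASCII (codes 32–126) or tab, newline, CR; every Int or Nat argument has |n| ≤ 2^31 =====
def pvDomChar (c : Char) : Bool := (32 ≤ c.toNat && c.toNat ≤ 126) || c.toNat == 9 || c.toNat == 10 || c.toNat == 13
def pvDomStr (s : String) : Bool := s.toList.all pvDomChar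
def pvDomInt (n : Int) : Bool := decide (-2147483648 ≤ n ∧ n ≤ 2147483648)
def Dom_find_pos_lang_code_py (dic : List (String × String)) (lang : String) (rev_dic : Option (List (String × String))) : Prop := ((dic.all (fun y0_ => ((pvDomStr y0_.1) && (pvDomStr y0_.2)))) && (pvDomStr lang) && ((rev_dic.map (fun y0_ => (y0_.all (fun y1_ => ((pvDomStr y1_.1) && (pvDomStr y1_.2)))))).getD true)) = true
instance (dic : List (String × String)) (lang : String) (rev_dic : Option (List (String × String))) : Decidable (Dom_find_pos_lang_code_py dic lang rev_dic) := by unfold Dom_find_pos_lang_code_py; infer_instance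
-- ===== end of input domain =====

-- B replaces A's linear descending scan over prefix lengths by a binary search on the
-- prefix length (substring containment of lang[:i] is antitone in i); exact same results.
-- A raises IndexError (l[0] on an empty key) when len(lang)==1 and the effective reverse
-- dict has an empty key; Pre_ excludes exactly those inputs (B returns the empty-prefix match there).

-- ===== PORT A =====
-- shared with B: dict(pairs) / {v.lower(): k for k, v in dic.items()} / 'if not rev_dic' (both sources contain these identical lines)
def pvBuildRev (dic : List (String × String)) : PySem.Dict String String :=
  PySem.Dict.ofList ((PySem.Dict.ofList dic).items.map (fun p => (PySem.Str.lower p.2, p.1)))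

def pvEffRev (dic : List (String × String)) (rev_dic : Option (List (String × String))) : PySem.Dict String String :=
  match rev_dic with
  | none => pvBuildRev dic
  | some r => if r = [] then pvBuildRev dic else PySem.Dict.ofList r

-- {c: dic[c] for c in pos_code}  (dic[c] never raises: c comes from dic's keys; "" is a dummy default)
def pvDictOfCode (dicD : PySem.Dict String String) (pos_code : List String) : List (String × String) :=
  (PySem.Dict.ofList (pos_code.map (fun c => (c, dicD.getD c "")))).items

-- {rev_dic[l]: l for l in pos_lang}  (rev_dic[l] never raises: l comes from rev_dic's keys)
def pvDictOfLang (revD : PySem.Dict String String) (pos_lang : List String) : List (String × String) :=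
  (PySem.Dict.ofList (pos_lang.map (fun l => (revD.getD l "", l)))).items

-- for i in range(len(lang)-1, 0, -1): ...
def pvLoopA (dicD revD : PySem.Dict String String) (lang lang_lower : String) :
    List Int → Option (List (String × String))
  | [] => none
  | i :: rest =>
    let pos_code := dicD.keys.filter (fun c => PySem.Str.isIn (PySem.Str.slice lang none (some i)) c)
    if pos_code ≠ [] then some (pvDictOfCode dicD pos_code)
    else
      let pos_lang := revD.keys.filter (fun l => PySem.Str.isIn (PySem.Str.slice lang_lower none (some i)) l)
      if pos_lang ≠ [] then some (pvDictOfLang revD pos_lang)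
      else pvLoopA dicD revD lang lang_lower rest

def find_pos_lang_code_py (dic : List (String × String)) (lang : String) (rev_dic : Option (List (String × String))) : Option (List (String × String)) :=
  let dicD := PySem.Dict.ofList dic
  let revD := pvEffRev dic rev_dic
  let lang_lower := PySem.Str.lower lang
  if PySem.Str.len lang = 1 then
    -- {c: l for l, c in rev_dic.items() if l[0] == lang_lower}; l[0] = IndexError on l = "" (excluded by Pre_)
    some (PySem.Dict.ofList ((revD.items.filter
      (fun p => (PySem.Str.pyGet? p.1 0).elim false (fun ch => [ch] == lang_lower.toList))).map
      (fun p => (p.2, p.1)))).items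
  else
    pvLoopA dicD revD lang lang_lower (PySem.List.pyRange (PySem.Str.len lang - 1) 0 (-1))

-- ===== PORT B =====
-- any(s[:mid] in k for k in keys)
def pvBAny (keys : List String) (s : String) (i : Int) : Bool :=
  keys.any (fun k => PySem.Str.isIn (PySem.Str.slice s none (some i)) k)

-- while lo < hi: mid = (lo+hi+1)//2; ...
def pvGo (keys : List String) (s : String) (lo hi : Int) : Int :=
  if lo < hi then
    let mid := PySem.Int.floordiv (lo + hi + 1) 2
    if pvBAny keys s mid then pvGo keys s mid hi
    else pvGo keys s lo (mid - 1)
  else lo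
termination_by (hi - lo).toNat
decreasing_by
  all_goals simp only [PySem.Int.floordiv_eq_ediv_of_pos (by norm_num : (0:Int) < 2)]
  all_goals omega

def pvMaxMatch (keys : List String) (s : String) (langLen : Int) : Int :=
  if keys = [] then 0 else pvGo keys s 0 (langLen - 1)

def find_pos_lang_code_py_alt (dic : List (String × String)) (lang : String) (rev_dic : Option (List (String × String))) : Option (List (String × String)) :=
  let dicD := PySem.Dict.ofList dic
  let revD := pvEffRev dic rev_dic
  let lang_lower := PySem.Str.lower lang
  if PySem.Str.len lang = 1 then
    some (PySem.Dict.ofList ((revD.items.filter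
      (fun p => PySem.Str.startswith p.1 lang_lower)).map (fun p => (p.2, p.1)))).items
  else
    let ic := pvMaxMatch dicD.keys lang (PySem.Str.len lang)
    let il := pvMaxMatch revD.keys lang_lower (PySem.Str.len lang)
    if ic ≥ il ∧ ic ≥ 1 then
      some (pvDictOfCode dicD (dicD.keys.filter (fun c => PySem.Str.isIn (PySem.Str.slice lang none (some ic)) c)))
    else if il ≥ 1 then
      some (pvDictOfLang revD (revD.keys.filter (fun l => PySem.Str.isIn (PySem.Str.slice lang_lower none (some il)) l)))
    else none

-- ===== PRECONDITION & SPEC =====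
-- the keys of the reverse dict A will index with [0]
def pvPreList (dic : List (String × String)) (rev_dic : Option (List (String × String))) : List String :=
  match rev_dic with
  | none => dic.map (fun p => p.2)
  | some r => if r = [] then dic.map (fun p => p.2) else r.map (fun p => p.1)

-- Pre_ excludes only the inputs where A raises IndexError: a single-character lang together with
-- an empty string among the effective reverse-dict keys (i.e. an empty provided key / empty dic value).
def Pre_find_pos_lang_code_py (dic : List (String × String)) (lang : String) (rev_dic : Option (List (String × String))) : Prop :=
  lang.toList.length = 1 → ∀ s ∈ pvPreList dic rev_dic, s ≠ ""
instance (dic : List (String × String)) (lang : String) (rev_dic : Option (List (String × String))) : Decidable (Pre_find_pos_lang_code_py dic lang rev_dic) := by unfold Pre_find_pos_lang_code_py; infer_instance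

def pvWitness_find_pos_lang_code_py : (List (String × String)) × String × (Option (List (String × String))) :=
  ([("en", "English"), ("fr", "French")], "fre", none)


def Spec_find_pos_lang_code_py (dic : List (String × String)) (lang : String) (rev_dic : Option (List (String × String))) (out : Option (List (String × String))) : Prop := out = find_pos_lang_code_py_alt dic lang rev_dic
instance (dic : List (String × String)) (lang : String) (rev_dic : Option (List (String × String))) (out : Option (List (String × String))) : Decidable (Spec_find_pos_lang_code_py dic lang rev_dic out) := by unfold Spec_find_pos_lang_code_py; infer_instance

-- ===== CLAIM (what is proved, stated in full; the proofs are below) =====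
def Claim_equal_find_pos_lang_code_py : Prop := ∀ (dic : List (String × String)) (lang : String) (rev_dic : Option (List (String × String))), Dom_find_pos_lang_code_py dic lang rev_dic → Pre_find_pos_lang_code_py dic lang rev_dic → Spec_find_pos_lang_code_py dic lang rev_dic (find_pos_lang_code_py dic lang rev_dic)


-- ===== LEMMAS AND PROOFS =====

-- membership in a dict built from a list comes from the list
theorem pv_mem_update_items {p : String × String} (l : List (String × String)) (d : PySem.Dict String String)
    (h : p ∈ (d.update l).items) : p ∈ l ∨ p ∈ d.items := by
  induction l generalizing d with
  | nil => exact Or.inr h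
  | cons x xs ih =>
    simp only [PySem.Dict.update, List.foldl_cons] at h
    rcases ih (d := d.insert x.1 x.2) (by simpa [PySem.Dict.update] using h) with h1 | h2
    · exact Or.inl (List.mem_cons_of_mem _ h1)
    · rcases (PySem.Dict.mem_items_insert _ _ _ _).1 h2 with h3 | h4
      · exact Or.inl (by simp [h3])
      · exact Or.inr h4.1

theorem pv_mem_items_ofList {p : String × String} (l : List (String × String))
    (h : p ∈ (PySem.Dict.ofList l).items) : p ∈ l := by
  rcases pv_mem_update_items l PySem.Dict.empty (by simpa [PySem.Dict.ofList] using h) with h1 | h2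
  · exact h1
  · simp [PySem.Dict.empty] at h2

theorem pv_lower_ne (s : String) (h : s ≠ "") : PySem.Str.lower s ≠ "" := by
  intro he
  apply h
  apply String.toList_eq_nil_iff.mp
  have := congrArg String.toList he
  simp only [PySem.Str.toList_lower, PySem.Chars.lower] at this
  simpa using this

theorem pv_buildRev_key_ne (dic : List (String × String))
    (hpre : ∀ s ∈ dic.map (fun p => p.2), s ≠ "") :
    ∀ p ∈ (pvBuildRev dic).items, p.1 ≠ "" := by
  intro p hp
  have := pv_mem_items_ofList _ hp
  rcases List.mem_map.1 this with ⟨q, hq, rfl⟩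
  have hq' : q ∈ dic := pv_mem_items_ofList _ hq
  exact pv_lower_ne _ (hpre q.2 (List.mem_map.2 ⟨q, hq', rfl⟩))

-- every key of the effective reverse dict is nonempty, given Pre_'s list condition
theorem pv_effRev_key_ne (dic : List (String × String)) (rev_dic : Option (List (String × String)))
    (hpre : ∀ s ∈ pvPreList dic rev_dic, s ≠ "") :
    ∀ p ∈ (pvEffRev dic rev_dic).items, p.1 ≠ "" := by
  match rev_dic with
  | none => exact pv_buildRev_key_ne dic (by simpa [pvPreList] using hpre)
  | some r =>
    by_cases hr : r = []
    · subst hr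
      exact pv_buildRev_key_ne dic (by simpa [pvPreList] using hpre)
    · intro p hp
      simp only [pvEffRev, if_neg hr] at hp
      have := pv_mem_items_ofList _ hp
      simp only [pvPreList, if_neg hr] at hpre
      exact hpre p.1 (List.mem_map.2 ⟨p, this, rfl⟩)

-- on a nonempty key, A's l[0] == lang_lower test agrees with B's l.startswith(lang_lower)
theorem pv_pred_eq (l ll : String) (hl : l ≠ "") (hll : ll.toList.length = 1) :
    ((PySem.Str.pyGet? l 0).elim false (fun ch => [ch] == ll.toList)) = PySem.Str.startswith l ll := by
  rcases hc : l.toList with _ | ⟨c, cs⟩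
  · exact absurd (String.toList_eq_nil_iff.mp hc) hl
  rcases hd : ll.toList with _ | ⟨d, ds⟩
  · simp [hd] at hll
  have hds : ds = [] := by simpa [hd] using hll
  subst hds
  rw [PySem.Str.pyGet?_eq, PySem.Chars.pyGet?_eq_listPyGet?, PySem.Str.startswith_eq, hc, hd]
  have hsw : PySem.Chars.startswith (c :: cs) [d] = (d == c) := by
    rcases eq_or_ne d c with hcd | hcd
    · subst hcd
      simp [PySem.Chars.startswith_iff, List.cons_prefix_cons]
    · have h2 : PySem.Chars.startswith (c :: cs) [d] = false :=
        Bool.eq_false_iff.mpr (fun h => hcd (by simpa [List.cons_prefix_cons] using (PySem.Chars.startswith_iff _ _).1 h))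
      rw [h2]
      simp [hcd]
  rw [hsw]
  simp only [PySem.List.pyGet?]
  norm_num [PySem.List.pyIdx?]
  rcases eq_or_ne c d with hcd2 | hcd2
  · subst hcd2
    simp
  · simp [hcd2, Ne.symm hcd2]

theorem pv_toList_slice_to (s : String) (i : Int) (h : 0 ≤ i) :
    (PySem.Str.slice s none (some i)).toList = s.toList.take i.toNat := by
  rw [PySem.Str.toList_slice, PySem.Chars.slice_eq_listSlice]
  exact PySem.List.slice_to _ h

-- substring containment of s[:i] is antitone in i
theorem pv_bany_mono (keys : List String) (s : String) {i j : Int} (h0 : 0 ≤ i) (hij : i ≤ j)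
    (h : pvBAny keys s j = true) : pvBAny keys s i = true := by
  rcases List.any_eq_true.1 h with ⟨k, hk, hin⟩
  refine List.any_eq_true.2 ⟨k, hk, ?_⟩
  rw [PySem.Str.isIn_eq, pv_toList_slice_to s j (le_trans h0 hij)] at hin
  rw [PySem.Str.isIn_eq, pv_toList_slice_to s i h0]
  rw [PySem.Chars.isIn_iff_infix] at hin ⊢
  exact ((List.take_prefix_take_left (Int.toNat_le_toNat hij)).isInfix).trans hin

theorem pv_bany_zero (keys : List String) (s : String) (hk : keys ≠ []) : pvBAny keys s 0 = true := by
  rcases List.exists_mem_of_ne_nil keys hk with ⟨k, hkm⟩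
  refine List.any_eq_true.2 ⟨k, hkm, ?_⟩
  rw [PySem.Str.isIn_eq, pv_toList_slice_to s 0 le_rfl]
  simp [PySem.Chars.isIn_nil]

theorem pv_filter_ne_nil (l : List String) (p : String → Bool) : l.filter p ≠ [] ↔ l.any p = true := by
  simp [List.filter_eq_nil_iff, List.any_eq_true]

-- the binary search returns the largest prefix length (within [lo, hi]) that still matches
theorem pv_go_spec (keys : List String) (s : String) (lo hi : Int) (h0 : 0 ≤ lo)
    (hQ : pvBAny keys s lo = true) :
    lo ≤ pvGo keys s lo hi ∧ pvGo keys s lo hi ≤ max lo hi ∧ pvBAny keys s (pvGo keys s lo hi) = true ∧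
      ∀ j, pvGo keys s lo hi < j → j ≤ hi → pvBAny keys s j = false := by
  by_cases hlh : lo < hi
  · have hmb : lo < PySem.Int.floordiv (lo + hi + 1) 2 ∧ PySem.Int.floordiv (lo + hi + 1) 2 ≤ hi := by
      simp only [PySem.Int.floordiv_eq_ediv_of_pos (by norm_num : (0:Int) < 2)]
      omega
    rw [pvGo, if_pos hlh]
    by_cases hmid : pvBAny keys s (PySem.Int.floordiv (lo + hi + 1) 2) = true
    · rw [if_pos hmid]
      obtain ⟨i1, i2, i3, i4⟩ := pv_go_spec keys s (PySem.Int.floordiv (lo + hi + 1) 2) hi (by omega) hmid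
      exact ⟨by omega, by omega, i3, fun j hj1 hj2 => i4 j hj1 hj2⟩
    · rw [if_neg hmid]
      obtain ⟨i1, i2, i3, i4⟩ := pv_go_spec keys s lo (PySem.Int.floordiv (lo + hi + 1) 2 - 1) h0 hQ
      refine ⟨i1, by omega, i3, fun j hj1 hj2 => ?_⟩
      by_cases hjm : j ≤ PySem.Int.floordiv (lo + hi + 1) 2 - 1
      · exact i4 j hj1 hjm
      · by_contra hc
        simp only [Bool.not_eq_false] at hc
        exact hmid (pv_bany_mono keys s (by omega) (by omega : PySem.Int.floordiv (lo + hi + 1) 2 ≤ j) hc)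
  · rw [pvGo, if_neg hlh]
    exact ⟨le_rfl, by omega, hQ, fun j hj1 hj2 => by omega⟩
termination_by (hi - lo).toNat
decreasing_by
  all_goals simp only [PySem.Int.floordiv_eq_ediv_of_pos (by norm_num : (0:Int) < 2)] at hmb ⊢
  all_goals omega

theorem pv_maxMatch_spec (keys : List String) (s : String) (L : Int) (hL : 2 ≤ L) :
    0 ≤ pvMaxMatch keys s L ∧ pvMaxMatch keys s L ≤ L - 1 ∧
      (1 ≤ pvMaxMatch keys s L → pvBAny keys s (pvMaxMatch keys s L) = true) ∧
      ∀ j, pvMaxMatch keys s L < j → j ≤ L - 1 → pvBAny keys s j = false := by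
  by_cases hk : keys = []
  · subst hk
    have h1 : pvMaxMatch [] s L = 0 := by simp [pvMaxMatch]
    rw [h1]
    exact ⟨le_rfl, by omega, by omega, fun j _ _ => by simp [pvBAny]⟩
  · simp only [pvMaxMatch, if_neg hk]
    obtain ⟨i1, i2, i3, i4⟩ := pv_go_spec keys s 0 (L - 1) le_rfl (pv_bany_zero keys s hk)
    exact ⟨i1, by omega, fun _ => i3, i4⟩

theorem pv_maxMatch_small (keys : List String) (s : String) (L : Int) (hL : L ≤ 1) :
    pvMaxMatch keys s L = 0 := by
  by_cases hk : keys = []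
  · simp [pvMaxMatch, hk]
  · simp only [pvMaxMatch, if_neg hk]
    rw [pvGo, if_neg (by omega)]

-- A's descending scan, characterised by the two maximal matching prefix lengths
theorem pv_loopA_spec (dicD revD : PySem.Dict String String) (lang lang_lower : String)
    (L rc rl : Int)
    (hrcT : 1 ≤ rc → pvBAny dicD.keys lang rc = true)
    (hrlT : 1 ≤ rl → pvBAny revD.keys lang_lower rl = true)
    (hrcF : ∀ j, rc < j → j ≤ L - 1 → pvBAny dicD.keys lang j = false)
    (hrlF : ∀ j, rl < j → j ≤ L - 1 → pvBAny revD.keys lang_lower j = false)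
    (hrc0 : 0 ≤ rc) (hrl0 : 0 ≤ rl)
    (n : Nat) :
    (n : Int) ≤ L - 1 → rc ≤ (n : Int) → rl ≤ (n : Int) →
    pvLoopA dicD revD lang lang_lower (PySem.List.pyRange (n : Int) 0 (-1)) =
      (if 1 ≤ max rc rl then
        (if rl ≤ rc then
          some (pvDictOfCode dicD (dicD.keys.filter (fun c => PySem.Str.isIn (PySem.Str.slice lang none (some rc)) c)))
        else
          some (pvDictOfLang revD (revD.keys.filter (fun l => PySem.Str.isIn (PySem.Str.slice lang_lower none (some rl)) l))))
       else none) := by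
  induction n with
  | zero =>
    intro _ hca hla
    rw [PySem.List.pyRange_neg_one_eq_nil (by norm_num)]
    rw [if_neg (by omega)]
    rfl
  | succ m ih =>
    intro ha hca hla
    rw [PySem.List.pyRange_neg_one_cons (by positivity)]
    rw [pvLoopA]
    by_cases hc : pvBAny dicD.keys lang ((m + 1 : Nat) : Int) = true
    · have hrc : rc = ((m + 1 : Nat) : Int) := by
        by_contra hne
        have h1 : rc < ((m + 1 : Nat) : Int) := by omega
        have := hrcF _ h1 ha
        rw [hc] at this
        cases this
      rw [if_pos ((pv_filter_ne_nil _ _).2 hc)]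
      rw [if_pos (by omega), if_pos (by omega)]
      rw [hrc]
    · have hrcm : rc ≤ (m : Int) := by
        by_contra hne
        have h1 : rc = ((m + 1 : Nat) : Int) := by push_cast at *; omega
        have h2 : 1 ≤ rc := by omega
        exact hc (h1 ▸ hrcT h2)
      by_cases hlg : pvBAny revD.keys lang_lower ((m + 1 : Nat) : Int) = true
      · have hrl : rl = ((m + 1 : Nat) : Int) := by
          by_contra hne
          have h1 : rl < ((m + 1 : Nat) : Int) := by omega
          have := hrlF _ h1 ha
          rw [hlg] at this
          cases this
        rw [if_neg (by simpa [pvBAny] using hc), if_pos ((pv_filter_ne_nil _ _).2 hlg)]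
        rw [if_pos (by omega), if_neg (by omega)]
        rw [hrl]
      · have hrlm : rl ≤ (m : Int) := by
          by_contra hne
          have h1 : rl = ((m + 1 : Nat) : Int) := by push_cast at *; omega
          have h2 : 1 ≤ rl := by omega
          exact hlg (h1 ▸ hrlT h2)
        rw [if_neg (by simpa [pvBAny] using hc), if_neg (by simpa [pvBAny] using hlg)]
        have := ih (by push_cast at *; omega) hrcm hrlm
        rw [show ((m + 1 : Nat) : Int) - 1 = ((m : Nat) : Int) by push_cast; ring]
        exact this

-- ===== VERDICT (by name: the statement is the Claim_ definition above) =====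
theorem find_pos_lang_code_py_spec : Claim_equal_find_pos_lang_code_py := by
  unfold Claim_equal_find_pos_lang_code_py
  intro dic lang rev_dic hdom hpre
  unfold Spec_find_pos_lang_code_py
  unfold find_pos_lang_code_py find_pos_lang_code_py_alt
  by_cases h1 : PySem.Str.len lang = 1
  · rw [if_pos h1, if_pos h1]
    have hlen : lang.toList.length = 1 := by
      rw [PySem.Str.len_eq] at h1
      exact_mod_cast h1
    have hkeys := pv_effRev_key_ne dic rev_dic (hpre hlen)
    have hll : (PySem.Str.lower lang).toList.length = 1 := by
      rw [PySem.Str.toList_lower, PySem.Chars.lower, List.length_map, hlen]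
    have hfeq : List.filter (fun p => (PySem.Str.pyGet? p.1 0).elim false fun ch => [ch] == (PySem.Str.lower lang).toList) (pvEffRev dic rev_dic).items
        = List.filter (fun p => PySem.Str.startswith p.1 (PySem.Str.lower lang)) (pvEffRev dic rev_dic).items :=
      List.filter_congr (fun p hp => pv_pred_eq p.1 (PySem.Str.lower lang) (hkeys p hp) hll)
    rw [hfeq]
  · rw [if_neg h1, if_neg h1]
    rcases hL : lang.toList.length with _ | _ | K
    · -- len(lang) == 0: empty loop, both sides None
      rw [PySem.Str.len_eq, hL]
      rw [PySem.List.pyRange_neg_one_eq_nil (by norm_num)]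
      rw [pv_maxMatch_small _ _ _ (by norm_num), pv_maxMatch_small _ _ _ (by norm_num)]
      norm_num [pvLoopA]
    · exact absurd (by rw [PySem.Str.len_eq, hL]; norm_num) h1
    · -- len(lang) ≥ 2
      have hL2 : (2 : Int) ≤ PySem.Str.len lang := by
        rw [PySem.Str.len_eq, hL]; push_cast; omega
      obtain ⟨c0, c1, c2, c3⟩ := pv_maxMatch_spec (PySem.Dict.ofList dic).keys lang (PySem.Str.len lang) hL2
      obtain ⟨l0, l1, l2, l3⟩ := pv_maxMatch_spec (pvEffRev dic rev_dic).keys (PySem.Str.lower lang) (PySem.Str.len lang) hL2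
      have hcast : ((K + 1 : Nat) : Int) = PySem.Str.len lang - 1 := by
        rw [PySem.Str.len_eq, hL]; push_cast; ring
      have := pv_loopA_spec (PySem.Dict.ofList dic) (pvEffRev dic rev_dic) lang (PySem.Str.lower lang)
        (PySem.Str.len lang)
        (pvMaxMatch (PySem.Dict.ofList dic).keys lang (PySem.Str.len lang))
        (pvMaxMatch (pvEffRev dic rev_dic).keys (PySem.Str.lower lang) (PySem.Str.len lang))
        c2 l2 c3 l3 c0 l0 (K + 1)
        (by omega) (by omega) (by omega)
      rw [hcast] at this
      rw [this]
      by_cases g1 : 1 ≤ max (pvMaxMatch (PySem.Dict.ofList dic).keys lang (PySem.Str.len lang)) (pvMaxMatch (pvEffRev dic rev_dic).keys (PySem.Str.lower lang) (PySem.Str.len lang))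
      · by_cases g2 : pvMaxMatch (pvEffRev dic rev_dic).keys (PySem.Str.lower lang) (PySem.Str.len lang) ≤ pvMaxMatch (PySem.Dict.ofList dic).keys lang (PySem.Str.len lang)
        · rw [if_pos g1, if_pos g2, if_pos ⟨by omega, by omega⟩]
        · rw [if_pos g1, if_neg g2, if_neg (by omega), if_pos (by omega)]
      · rw [if_neg g1, if_neg (by omega), if_neg (by omega)]
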